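-- pv_equiv track=rewrite | github.com/paulwritescode/Departmental-Result-Management-System | test.py | arrayChallenge
-- ===== SOURCE A (Python) =====
-- def arrayChallenge(arr):
--     n = len(arr)
--     result = [0] * n
--
--     for i in range(n):
--         counter = 0
--         for j in range(i):
--             if arr[j] > arr[i]:
--                 counter -= abs(arr[j] - arr[i])
--             else:
--                 counter += abs(arr[j] - arr[i])
--         result[i] = counter
--
--     return result
-- ===== SOURCE B (Python) =====
-- def arrayChallenge(arr):
--     # Both branches of A add arr[i] - arr[j]; one O(n) pass with a running prefix sum.
--     result = []
--     prefix = 0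
--     for i, x in enumerate(arr):
--         result.append(i * x - prefix)
--         prefix += x
--     return result
-- ===== Notes on version B (the rewrite author's own statement) =====
-- stated objective: faster
-- what changed: Each entry equals i*arr[i] minus the sum of earlier elements (both of A's branches add arr[i]-arr[j]), so B computes it in one pass with a running prefix sum instead of A's nested scan.
import Mathlib
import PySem

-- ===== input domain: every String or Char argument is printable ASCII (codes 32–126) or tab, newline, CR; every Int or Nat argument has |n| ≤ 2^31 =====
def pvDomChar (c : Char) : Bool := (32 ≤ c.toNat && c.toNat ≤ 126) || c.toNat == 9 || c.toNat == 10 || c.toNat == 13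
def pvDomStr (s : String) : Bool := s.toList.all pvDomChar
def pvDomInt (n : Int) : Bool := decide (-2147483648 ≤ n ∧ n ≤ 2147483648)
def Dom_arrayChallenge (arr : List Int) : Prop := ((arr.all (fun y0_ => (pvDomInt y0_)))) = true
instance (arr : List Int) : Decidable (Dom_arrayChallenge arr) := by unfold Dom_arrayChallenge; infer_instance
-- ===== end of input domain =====

-- B replaces A's O(n^2) nested scan with a single pass keeping a running prefix sum.

-- ===== PORT A =====
-- literal port of A: for each i, an inner loop over j < i accumulating ±|arr[j]-arr[i]|
def arrayChallenge (arr : List Int) : List Int :=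
  let n := arr.length
  (List.range n).map (fun i =>
    (List.range i).foldl (fun counter j =>
      if arr.getD j 0 > arr.getD i 0 then counter - |arr.getD j 0 - arr.getD i 0|
      else counter + |arr.getD j 0 - arr.getD i 0|) 0)

-- ===== PORT B =====
-- one pass: emit i*x - prefix, then add x to prefix
def altGo : List Int → Int → Int → List Int
  | [], _, _ => []
  | x :: xs, i, pfx => (i * x - pfx) :: altGo xs (i + 1) (pfx + x)

def arrayChallenge_alt (arr : List Int) : List Int := altGo arr 0 0

-- ===== PRECONDITION & SPEC =====
def Spec_arrayChallenge (arr : List Int) (out : List Int) : Prop := out = arrayChallenge_alt arr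
instance (arr : List Int) (out : List Int) : Decidable (Spec_arrayChallenge arr out) := by unfold Spec_arrayChallenge; infer_instance

-- ===== CLAIM (what is proved, stated in full; the proofs are below) =====
def Claim_equal_arrayChallenge : Prop := ∀ (arr : List Int), Dom_arrayChallenge arr → Spec_arrayChallenge arr (arrayChallenge arr)

-- ===== LEMMAS AND PROOFS =====

-- A's inner loop: both branches add arr[i] - arr[j], so the fold is a closed form
theorem innerA_eq (arr : List Int) (ai : Int) :
    ∀ (i : Nat) (c0 : Int),
      (List.range i).foldl (fun counter j =>
        if arr.getD j 0 > ai then counter - |arr.getD j 0 - ai|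
        else counter + |arr.getD j 0 - ai|) c0
      = c0 + i * ai - ((List.range i).map (fun j => arr.getD j 0)).sum := by
  intro i
  induction i with
  | zero => simp
  | succ n ih =>
    intro c0
    rw [List.range_succ, List.foldl_append, List.map_append]
    simp only [List.foldl_cons, List.foldl_nil, List.map_cons, List.map_nil,
      List.sum_append, List.sum_cons, List.sum_nil, ih]
    split_ifs with h
    · push_cast; rw [abs_of_pos (by omega)]; ring
    · push_cast; rw [abs_of_nonpos (by omega)]; ring

-- the sum of getD over range i is the sum of take i
theorem sum_range_getD (arr : List Int) :
    ∀ (i : Nat), ((List.range i).map (fun j => arr.getD j 0)).sum = (arr.take i).sum := by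
  intro i
  induction i with
  | zero => simp
  | succ n ih =>
    rw [List.range_succ, List.map_append, List.sum_append, ih, List.take_add_one]
    simp only [List.map_cons, List.map_nil, List.sum_append, List.sum_cons, List.sum_nil]
    cases h : arr[n]? with
    | none => simp [List.getD, h]
    | some v => simp [List.getD, h]

-- B's loop in closed form
theorem altGo_eq (xs : List Int) :
    ∀ (k : Int) (p : Int),
      altGo xs k p
      = (List.range xs.length).map
          (fun (i : Nat) => (k + (i : Int)) * xs.getD i 0 - (p + (xs.take i).sum)) := by
  induction xs with
  | nil => intro k p; simp [altGo]
  | cons x xs ih =>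
    intro k p
    simp only [altGo, List.length_cons, List.range_succ_eq_map, List.map_cons, List.map_map]
    congr 1
    · simp
    · rw [ih (k + 1) (p + x)]
      apply List.map_congr_left
      intro i _
      simp only [Function.comp, List.getD_cons_succ, List.take_succ_cons, List.sum_cons]
      push_cast
      ring

-- ===== VERDICT (by name: the statement is the Claim_ definition above) =====
theorem arrayChallenge_spec : Claim_equal_arrayChallenge := by
  intro arr _
  unfold Spec_arrayChallenge arrayChallenge arrayChallenge_alt
  rw [altGo_eq]
  apply List.map_congr_left
  intro i hi
  rw [innerA_eq, sum_range_getD]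
  simp at hi ⊢
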